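-- pv_equiv track=rewrite | github.com/tdlong/local_TE | scripts/extract_junction_kmers.py | expand_iupac
-- ===== SOURCE A (Python) =====
-- IUPAC = {
--     'R': 'AG', 'Y': 'CT', 'S': 'GC', 'W': 'AT',
--     'K': 'GT', 'M': 'AC', 'B': 'CGT', 'D': 'AGT',
--     'H': 'ACT', 'V': 'ACG', 'N': 'ACGT',
-- }
--
-- def expand_iupac(kmer):
--     """Expand a k-mer containing IUPAC ambiguity codes into all concrete variants."""
--     seqs = ['']
--     for base in kmer.upper():
--         if base in IUPAC:
--             seqs = [s + b for s in seqs for b in IUPAC[base]]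
--         else:
--             seqs = [s + base for s in seqs]
--     return seqs
-- ===== SOURCE B (Python) =====
-- import itertools
--
-- IUPAC = {
--     'R': 'AG', 'Y': 'CT', 'S': 'GC', 'W': 'AT',
--     'K': 'GT', 'M': 'AC', 'B': 'CGT', 'D': 'AGT',
--     'H': 'ACT', 'V': 'ACG', 'N': 'ACGT',
-- }
--
-- def expand_iupac(kmer):
--     """Expand a k-mer containing IUPAC ambiguity codes into all concrete variants."""
--     options = [IUPAC[b] if b in IUPAC else b for b in kmer.upper()]
--     return [''.join(p) for p in itertools.product(*options)]
-- ===== Notes on version B (the rewrite author's own statement) =====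
-- stated objective: idiomatic
-- what changed: Replaces the growing-prefix list rebuilt in a loop by a precomputed per-position choice table traversed once with itertools.product.
import Mathlib
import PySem

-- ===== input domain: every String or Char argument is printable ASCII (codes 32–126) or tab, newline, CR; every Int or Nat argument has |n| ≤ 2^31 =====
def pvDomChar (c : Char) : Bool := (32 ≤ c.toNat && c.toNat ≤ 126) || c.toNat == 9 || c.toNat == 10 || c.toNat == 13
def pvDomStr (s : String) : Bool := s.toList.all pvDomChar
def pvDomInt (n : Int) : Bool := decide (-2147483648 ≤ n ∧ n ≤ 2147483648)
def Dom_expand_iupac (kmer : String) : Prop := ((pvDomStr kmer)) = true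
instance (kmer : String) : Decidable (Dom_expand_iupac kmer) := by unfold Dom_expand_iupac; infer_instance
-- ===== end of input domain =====

-- B replaces A's growing-prefix accumulation by a precomputed per-position choice table
-- traversed once with a Cartesian product (itertools.product); same output, same cost (idiomatic).

-- ===== PORT A =====
-- the IUPAC dict (single-char keys mapped to their allowed bases)
def pvIUPAC : PySem.Dict Char (List Char) := PySem.Dict.ofList
  [('R', ['A','G']), ('Y', ['C','T']), ('S', ['G','C']), ('W', ['A','T']),
   ('K', ['G','T']), ('M', ['A','C']), ('B', ['C','G','T']), ('D', ['A','G','T']),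
   ('H', ['A','C','T']), ('V', ['A','C','G']), ('N', ['A','C','G','T'])]

-- literal port of A: seqs starts as [''], each base multiplies/extends every prefix
def expand_iupac (kmer : String) : List String :=
  ((PySem.Str.upper kmer).toList.foldl
    (fun (seqs : List (List Char)) (base : Char) =>
      match PySem.Dict.get? pvIUPAC base with
      | some v => seqs.flatMap (fun s => v.map (fun b => s ++ [b]))
      | none   => seqs.map (fun s => s ++ [base]))
    [[]]).map String.mk

-- ===== PORT B =====
-- B's choice table: allowed characters at each position
def pvOptions (kmer : String) : List (List Char) :=
  (PySem.Str.upper kmer).toList.map (fun b =>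
    match PySem.Dict.get? pvIUPAC b with
    | some v => v
    | none   => [b])

-- itertools.product over the option lists (last position varies fastest)
def pvProduct : List (List Char) → List (List Char)
  | [] => [[]]
  | o :: os => o.flatMap (fun c => (pvProduct os).map (fun p => c :: p))

def expand_iupac_alt (kmer : String) : List String :=
  (pvProduct (pvOptions kmer)).map String.mk

-- ===== PRECONDITION & SPEC =====
def Spec_expand_iupac (kmer : String) (out : List String) : Prop := out = expand_iupac_alt kmer
instance (kmer : String) (out : List String) : Decidable (Spec_expand_iupac kmer out) := by unfold Spec_expand_iupac; infer_instance

-- ===== CLAIM (what is proved, stated in full; the proofs are below) =====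
def Claim_equal_expand_iupac : Prop := ∀ (kmer : String), Dom_expand_iupac kmer → Spec_expand_iupac kmer (expand_iupac kmer)

-- ===== LEMMAS AND PROOFS =====

-- the per-base step of A's loop, named for the invariant lemma
def pvStep (seqs : List (List Char)) (base : Char) : List (List Char) :=
  match PySem.Dict.get? pvIUPAC base with
  | some v => seqs.flatMap (fun s => v.map (fun b => s ++ [b]))
  | none   => seqs.map (fun s => s ++ [base])

-- A's step is a flatMap over B's option list for that base
lemma pvStep_eq (seqs : List (List Char)) (base : Char) :
    pvStep seqs base =
      seqs.flatMap (fun s =>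
        (match PySem.Dict.get? pvIUPAC base with
          | some v => v
          | none   => [base]).map (fun b => s ++ [b])) := by
  unfold pvStep
  cases PySem.Dict.get? pvIUPAC base with
  | some v => rfl
  | none =>
      simp only [List.flatMap]
      induction seqs with
      | nil => rfl
      | cons a l ihs => simp [ihs]

-- loop invariant: folding A's step over cs from any seqs appends every product of cs's options
lemma pvFold_eq (cs : List Char) : ∀ (seqs : List (List Char)),
    cs.foldl pvStep seqs =
      seqs.flatMap (fun s =>
        (pvProduct (cs.map (fun b =>
          match PySem.Dict.get? pvIUPAC b with
          | some v => v
          | none   => [b]))).map (fun p => s ++ p)) := by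
  induction cs with
  | nil => intro seqs; simp [pvProduct]
  | cons c cs ih =>
    intro seqs
    simp only [List.foldl_cons, ih, pvStep_eq, List.map_cons, pvProduct]
    rw [List.flatMap_assoc]
    simp [List.map_flatMap, List.map_map, List.flatMap_map, Function.comp_def, List.append_assoc]

-- ===== VERDICT (by name: the statement is the Claim_ definition above) =====
theorem expand_iupac_spec : Claim_equal_expand_iupac := by
  intro kmer _
  show expand_iupac kmer = expand_iupac_alt kmer
  unfold expand_iupac expand_iupac_alt pvOptions
  rw [show (fun (seqs : List (List Char)) (base : Char) =>
      match PySem.Dict.get? pvIUPAC base with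
      | some v => seqs.flatMap (fun s => v.map (fun b => s ++ [b]))
      | none   => seqs.map (fun s => s ++ [base])) = pvStep from rfl]
  rw [pvFold_eq]
  simp
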